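-- pv_equiv track=rewrite | github.com/Bardhitoo/CSCI.603-Computational-Problem-Solving | Week 13/icemaze-stu.py | is_left
-- ===== SOURCE A (Python) =====
-- ROCK = "*"
--
-- def is_left(i, j, maze):
--     check_maze = maze[i]
--     left = None
--     for j2 in range(len(check_maze) - 1, -1, -1):
--
--         if (j2 < j):
--             if (check_maze[j2] == "."):
--                 left = j2
--             if (check_maze[j2] == ROCK):
--                 break
--
--     if left != None:
--         return (i, left)
--     else:
--         return None
-- ===== SOURCE B (Python) =====
-- def is_left(i, j, maze):
--     row = maze[i]
--     left = None
--     for j2, ch in enumerate(row):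
--         if j2 >= j:
--             break
--         if ch == "*":
--             left = None
--         elif ch == "." and left is None:
--             left = j2
--     return (i, left) if left is not None else None
-- ===== Notes on version B (the rewrite author's own statement) =====
-- stated objective: alternative
-- what changed: A scans the row right-to-left over the whole range, skipping indices >= j and breaking at the first rock; B makes a single left-to-right pass that stops at index j, resets its candidate on a rock and records only the first dot after the last rock.
import Mathlib
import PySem

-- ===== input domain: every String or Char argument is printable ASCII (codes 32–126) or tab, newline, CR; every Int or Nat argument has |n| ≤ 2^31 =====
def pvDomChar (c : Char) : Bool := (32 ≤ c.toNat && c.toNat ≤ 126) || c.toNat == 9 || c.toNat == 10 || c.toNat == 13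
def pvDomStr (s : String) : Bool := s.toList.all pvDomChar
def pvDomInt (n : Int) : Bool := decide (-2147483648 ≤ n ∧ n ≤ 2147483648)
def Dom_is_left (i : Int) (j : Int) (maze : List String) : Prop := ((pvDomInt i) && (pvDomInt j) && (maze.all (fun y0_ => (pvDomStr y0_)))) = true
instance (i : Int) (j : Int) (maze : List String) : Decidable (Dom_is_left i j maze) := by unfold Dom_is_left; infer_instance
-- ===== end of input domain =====

-- B replaces A's right-to-left scan with break-on-rock by a single left-to-right pass that
-- resets its candidate on a rock and records only the first dot after the last rock (alternative decomposition).

-- ===== PORT A =====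
-- A's loop: for j2 in range(len(cs)-1, -1, -1) with break on ROCK; indices yielded by the range
-- are always in bounds, so pyGetD with a default char is exact where Python indexes.
def isLeftLoopA (cs : List Char) (j : Int) : List Int → Option Int → Option Int
  | [], left => left
  | j2 :: rest, left =>
    if j2 < j then
      if PySem.List.pyGetD cs j2 ' ' = '*' then
        (if PySem.List.pyGetD cs j2 ' ' = '.' then some j2 else left)
      else
        isLeftLoopA cs j rest (if PySem.List.pyGetD cs j2 ' ' = '.' then some j2 else left)
    else isLeftLoopA cs j rest left

def is_left (i : Int) (j : Int) (maze : List String) : Option (Int × Int) :=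
  match PySem.List.pyGet? maze i with
  | none => none   -- IndexError; excluded by Pre_is_left
  | some check_maze =>
    let cs := check_maze.toList
    match isLeftLoopA cs j (PySem.List.pyRange ((cs.length : Int) - 1) (-1) (-1)) none with
    | some l => some (i, l)
    | none => none

-- ===== PORT B =====
-- B's loop: for j2, ch in enumerate(row): break at j2 >= j; a rock resets left; the first dot
-- after the last rock is recorded.
def isLeftLoopB (j : Int) : Option Int → List (Int × Char) → Option Int
  | left, [] => left
  | left, (j2, ch) :: rest =>
    if j ≤ j2 then left
    else if ch = '*' then isLeftLoopB j none rest
    else if ch = '.' ∧ left = none then isLeftLoopB j (some j2) rest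
    else isLeftLoopB j left rest

def is_left_alt (i : Int) (j : Int) (maze : List String) : Option (Int × Int) :=
  match PySem.List.pyGet? maze i with
  | none => none   -- IndexError; excluded by Pre_is_left
  | some row =>
    match isLeftLoopB j none (PySem.List.enumerate row.toList 0) with
    | some l => some (i, l)
    | none => none

-- ===== PRECONDITION & SPEC =====
-- Pre_ excludes exactly the inputs where maze[i] raises IndexError.
def Pre_is_left (i : Int) (j : Int) (maze : List String) : Prop :=
  PySem.Raise.InRange maze.length i
instance (i : Int) (j : Int) (maze : List String) : Decidable (Pre_is_left i j maze) := by unfold Pre_is_left; infer_instance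

def pvWitness_is_left : Int × Int × List String := (0, 2, ["*.."])

def Spec_is_left (i : Int) (j : Int) (maze : List String) (out : Option (Int × Int)) : Prop := out = is_left_alt i j maze
instance (i : Int) (j : Int) (maze : List String) (out : Option (Int × Int)) : Decidable (Spec_is_left i j maze out) := by unfold Spec_is_left; infer_instance

-- ===== CLAIM (what is proved, stated in full; the proofs are below) =====
def Claim_equal_is_left : Prop := ∀ (i : Int) (j : Int) (maze : List String), Dom_is_left i j maze → Pre_is_left i j maze → Spec_is_left i j maze (is_left i j maze)

-- ===== LEMMAS AND PROOFS =====

-- abstract right-to-left scan over (index, char) pairs (A's loop body with the j-guard already applied)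
def revScan : List (Int × Char) → Option Int → Option Int
  | [], left => left
  | (j2, c) :: rest, left =>
    if c = '*' then (if c = '.' then some j2 else left)
    else revScan rest (if c = '.' then some j2 else left)

-- abstract left-to-right scan (B's loop body with the j-guard already applied)
def fwdScan : Option Int → List (Int × Char) → Option Int
  | left, [] => left
  | left, (j2, c) :: rest =>
    if c = '*' then fwdScan none rest
    else if c = '.' ∧ left = none then fwdScan (some j2) rest
    else fwdScan left rest

def hasRock (l : List (Int × Char)) : Bool := l.any (fun p => decide (p.2 = '*'))

lemma hasRock_cons (j2 : Int) (c : Char) (t : List (Int × Char)) :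
    hasRock ((j2, c) :: t) = (decide (c = '*') || hasRock t) := by
  simp [hasRock]

lemma loopA_eq_revScan (cs : List Char) (j : Int) (l : List Int) (left : Option Int) :
    isLeftLoopA cs j l left =
      revScan ((l.filter (fun k => decide (k < j))).map (fun k => (k, PySem.List.pyGetD cs k ' '))) left := by
  induction l generalizing left with
  | nil => rfl
  | cons a t ih =>
    by_cases h : a < j
    · rw [List.filter_cons_of_pos (by simpa using h)]
      rw [List.map_cons]
      simp only [isLeftLoopA, if_pos h, revScan]
      split
      · rfl
      · exact ih _
    · rw [List.filter_cons_of_neg (by simpa using h)]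
      simp only [isLeftLoopA, if_neg h]
      exact ih _

lemma loopB_eq_fwdScan (j : Int) (left : Option Int) (l : List (Int × Char)) :
    isLeftLoopB j left l = fwdScan left (l.takeWhile (fun p => decide (p.1 < j))) := by
  induction l generalizing left with
  | nil => rfl
  | cons a t ih =>
    obtain ⟨j2, c⟩ := a
    by_cases h : j ≤ j2
    · have h2 : decide (j2 < j) = false := by simp; omega
      simp only [isLeftLoopB, if_pos h, List.takeWhile_cons, h2, Bool.false_eq_true, if_false]
      rfl
    · have h2 : decide (j2 < j) = true := by simp; omega
      simp only [isLeftLoopB, if_neg h, List.takeWhile_cons, h2, if_true, fwdScan]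
      by_cases hc : c = '*'
      · rw [if_pos hc, if_pos hc]; exact ih none
      · rw [if_neg hc, if_neg hc]
        by_cases hd : c = '.' ∧ left = none
        · rw [if_pos hd, if_pos hd]; exact ih _
        · rw [if_neg hd, if_neg hd]; exact ih _

lemma range_filter_lt (j : Int) : ∀ (n : Nat) (a : Int),
    (PySem.List.pyRange a (a + n) 1).filter (fun k => decide (k < j)) =
      PySem.List.pyRange a (min (a + n) j) 1 := by
  intro n
  induction n with
  | zero =>
    intro a
    rw [PySem.List.pyRange_one_eq_nil (by omega), PySem.List.pyRange_one_eq_nil (by omega)]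
    rfl
  | succ m ih =>
    intro a
    rw [PySem.List.pyRange_one_cons (by push_cast; omega)]
    by_cases h : a < j
    · rw [List.filter_cons_of_pos (by simpa using h)]
      rw [show (a : Int) + ((m + 1 : Nat) : Int) = (a + 1) + (m : Int) by push_cast; ring]
      rw [ih (a + 1)]
      exact (PySem.List.pyRange_one_cons (by omega)).symm
    · rw [List.filter_cons_of_neg (by simpa using h)]
      rw [List.filter_eq_nil_iff.mpr ?_, PySem.List.pyRange_one_eq_nil (by omega)]
      intro k hk
      rw [PySem.List.mem_pyRange_one] at hk
      simp only [decide_eq_true_eq]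
      omega

lemma range_takeWhile_lt (j : Int) : ∀ (n : Nat) (a : Int),
    (PySem.List.pyRange a (a + n) 1).takeWhile (fun k => decide (k < j)) =
      PySem.List.pyRange a (min (a + n) j) 1 := by
  intro n
  induction n with
  | zero =>
    intro a
    rw [PySem.List.pyRange_one_eq_nil (by omega), PySem.List.pyRange_one_eq_nil (by omega)]
    rfl
  | succ m ih =>
    intro a
    rw [PySem.List.pyRange_one_cons (by push_cast; omega)]
    rw [List.takeWhile_cons]
    by_cases h : a < j
    · simp only [h, decide_true, if_true]
      rw [show (a : Int) + ((m + 1 : Nat) : Int) = (a + 1) + (m : Int) by push_cast; ring]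
      rw [ih (a + 1)]
      exact (PySem.List.pyRange_one_cons (by omega)).symm
    · simp only [h, decide_false, Bool.false_eq_true, if_false]
      rw [PySem.List.pyRange_one_eq_nil (by omega)]

lemma fwdScan_rock : ∀ (l : List (Int × Char)), hasRock l = true →
    ∀ (a a' : Option Int), fwdScan a l = fwdScan a' l := by
  intro l
  induction l with
  | nil => intro h; simp [hasRock] at h
  | cons p t ih =>
    intro h a a'
    obtain ⟨j2, c⟩ := p
    by_cases hc : c = '*'
    · simp [fwdScan, hc]
    · have ht : hasRock t = true := by
        rw [hasRock_cons, Bool.or_eq_true] at h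
        rcases h with h | h
        · exact absurd (of_decide_eq_true h) hc
        · exact h
      have e : ∀ b : Option Int, fwdScan b ((j2, c) :: t) = fwdScan none t := by
        intro b
        simp only [fwdScan, if_neg hc]
        split
        · exact ih ht _ _
        · exact ih ht _ _
      rw [e a, e a']

lemma fwdScan_some_norock : ∀ (l : List (Int × Char)), hasRock l = false →
    ∀ (k : Int), fwdScan (some k) l = some k := by
  intro l
  induction l with
  | nil => intro _ k; rfl
  | cons p t ih =>
    intro h k
    obtain ⟨j2, c⟩ := p
    rw [hasRock_cons, Bool.or_eq_false_iff] at h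
    obtain ⟨hc, ht⟩ := h
    have hc' : ¬ c = '*' := of_decide_eq_false hc
    simp only [fwdScan, if_neg hc']
    rw [if_neg (by simp)]
    exact ih ht k

lemma revScan_append_rock : ∀ (u : List (Int × Char)), hasRock u = true →
    ∀ (v : List (Int × Char)) (b : Option Int), revScan (u ++ v) b = revScan u b := by
  intro u
  induction u with
  | nil => intro h; simp [hasRock] at h
  | cons q u2 ih =>
    intro h v b
    obtain ⟨k2, d⟩ := q
    by_cases hd : d = '*'
    · simp [revScan, hd]
    · have hu2 : hasRock u2 = true := by
        rw [hasRock_cons, Bool.or_eq_true] at h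
        rcases h with h | h
        · exact absurd (of_decide_eq_true h) hd
        · exact h
      simp only [List.cons_append, revScan, if_neg hd]
      exact ih hu2 v _

lemma revScan_append_single : ∀ (u : List (Int × Char)), hasRock u = false →
    ∀ (j2 : Int) (c : Char) (b : Option Int),
      revScan (u ++ [(j2, c)]) b = (if c = '.' then some j2 else revScan u b) := by
  intro u
  induction u with
  | nil =>
    intro _ j2 c b
    simp only [List.nil_append, revScan, ite_self]
  | cons q u2 ih =>
    intro h j2 c b
    obtain ⟨k2, d⟩ := q
    rw [hasRock_cons, Bool.or_eq_false_iff] at h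
    obtain ⟨hd, hu2⟩ := h
    have hd' : ¬ d = '*' := of_decide_eq_false hd
    simp only [List.cons_append, revScan, if_neg hd']
    exact ih hu2 j2 c _

lemma revScan_reverse_eq_fwdScan : ∀ (l : List (Int × Char)) (left : Option Int),
    revScan l.reverse left =
      match fwdScan none l with
      | some k => some k
      | none => left := by
  intro l
  induction l with
  | nil => intro left; rfl
  | cons p t ih =>
    intro left
    obtain ⟨j2, c⟩ := p
    rw [List.reverse_cons]
    by_cases hr : hasRock t = true
    · have hrr : hasRock t.reverse = true := by
        simp only [hasRock, List.any_reverse]; exact hr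
      rw [revScan_append_rock _ hrr _ left, ih]
      have e : fwdScan none ((j2, c) :: t) = fwdScan none t := by
        by_cases hs : c = '*'
        · simp [fwdScan, hs]
        · simp only [fwdScan, if_neg hs]
          split
          · exact fwdScan_rock t hr _ _
          · rfl
      rw [e]
    · have hnr : hasRock t = false := by simpa using hr
      have hnrr : hasRock t.reverse = false := by
        simp only [hasRock, List.any_reverse]
        simpa [hasRock] using hnr
      rw [revScan_append_single _ hnrr j2 c left, ih]
      by_cases hc : c = '.'
      · rw [if_pos hc]
        have e : fwdScan none ((j2, c) :: t) = fwdScan (some j2) t := by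
          simp [fwdScan, hc]
        rw [e, fwdScan_some_norock t hnr]
      · rw [if_neg hc]
        have e : fwdScan none ((j2, c) :: t) = fwdScan none t := by
          by_cases hs : c = '*'
          · simp [fwdScan, hs]
          · simp [fwdScan, hs, hc]
        rw [e]

-- the common normal form of both loops on a row of characters
lemma loopA_eq_loopB (cs : List Char) (j : Int) :
    isLeftLoopA cs j (PySem.List.pyRange ((cs.length : Int) - 1) (-1) (-1)) none =
      isLeftLoopB j none (PySem.List.enumerate cs 0) := by
  rw [loopA_eq_revScan, loopB_eq_fwdScan]
  rw [PySem.List.pyRange_neg_one_eq_reverse]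
  rw [show ((-1 : Int) + 1) = 0 from rfl]
  rw [show ((cs.length : Int) - 1 + 1) = (cs.length : Int) by ring]
  rw [PySem.List.enumerate_eq_map_pyRange (d := ' ')]
  rw [show PySem.List.len cs = (cs.length : Int) from by simp [PySem.List.len]]
  rw [List.takeWhile_map]
  rw [show ((fun p : Int × Char => decide (p.1 < j)) ∘ (fun k => (k, PySem.List.pyGetD cs k ' '))) =
      (fun k => decide (k < j)) from rfl]
  rw [List.filter_reverse, List.map_reverse]
  rw [show (cs.length : Int) = (0 : Int) + (cs.length : Int) by ring]
  rw [range_filter_lt j cs.length 0, range_takeWhile_lt j cs.length 0]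
  rw [revScan_reverse_eq_fwdScan]
  cases fwdScan none ((PySem.List.pyRange 0 (min ((0 : Int) + (cs.length : Int)) j) 1).map
      (fun k => (k, PySem.List.pyGetD cs k ' '))) <;> rfl

-- ===== VERDICT (by name: the statement is the Claim_ definition above) =====
theorem is_left_spec : Claim_equal_is_left := by
  intro i j maze _ _
  unfold Spec_is_left is_left is_left_alt
  cases h : PySem.List.pyGet? maze i with
  | none => rfl
  | some row =>
    simp only
    rw [loopA_eq_loopB row.toList j]
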